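-- pv_equiv track=rewrite | github.com/kaitu-io/k2rule | scripts/extract_porn_terminology.py | find_compound_terms
-- ===== SOURCE A (Python) =====
-- from collections import Counter
-- from typing import List, Set, Dict, Tuple
--
-- def find_compound_terms(domains: List[str], min_count: int = 100) -> Counter:
--     """Find compound porn terms like sexshop, pornhub, etc."""
--     compound_counter = Counter()
--
--     # Common prefixes and suffixes in porn domains
--     prefixes = ["sex", "porn", "xxx", "hot", "live", "free", "real", "true"]
--     suffixes = ["sex", "porn", "hub", "tube", "cam", "show", "site", "zone", "land"]
--
--     for domain in domains:
--         domain_lower = domain.lower()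
--
--         # Check for prefix+suffix combinations
--         for prefix in prefixes:
--             for suffix in suffixes:
--                 compound = prefix + suffix
--                 if compound in domain_lower and prefix != suffix:
--                     compound_counter[compound] += 1
--
--     return Counter({term: count for term, count in compound_counter.items() if count >= min_count})
-- ===== SOURCE B (Python) =====
-- from collections import Counter
-- from typing import List
--
-- def find_compound_terms(domains: List[str], min_count: int = 100) -> Counter:
--     """Find compound porn terms by a sliding-window scan over each domain."""
--     prefixes = ["sex", "porn", "xxx", "hot", "live", "free", "real", "true"]
--     suffixes = ["sex", "porn", "hub", "tube", "cam", "show", "site", "zone", "land"]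
--     compounds = [p + s for p in prefixes for s in suffixes if p != s]
--     compound_set = set(compounds)
--     counts = {}
--     for domain in domains:
--         d = domain.lower()
--         hits = set()
--         for i in range(len(d)):
--             for w in (d[i:i+6], d[i:i+7], d[i:i+8]):
--                 if w in compound_set:
--                     hits.add(w)
--         for c in compounds:
--             if c in hits:
--                 counts[c] = counts.get(c, 0) + 1
--     return Counter({c: n for c, n in counts.items() if n >= min_count})
-- ===== Notes on version B (the rewrite author's own statement) =====
-- stated objective: alternative
-- what changed: Instead of running 72 prefix+suffix substring searches per domain, B precomputes the 70 compound patterns once, slides a window over each lowercased domain collecting length-6/7/8 substrings that are in the pattern set, and then tallies the hit set into a plain dict; the min_count filter and Counter construction are unchanged.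
import Mathlib
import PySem

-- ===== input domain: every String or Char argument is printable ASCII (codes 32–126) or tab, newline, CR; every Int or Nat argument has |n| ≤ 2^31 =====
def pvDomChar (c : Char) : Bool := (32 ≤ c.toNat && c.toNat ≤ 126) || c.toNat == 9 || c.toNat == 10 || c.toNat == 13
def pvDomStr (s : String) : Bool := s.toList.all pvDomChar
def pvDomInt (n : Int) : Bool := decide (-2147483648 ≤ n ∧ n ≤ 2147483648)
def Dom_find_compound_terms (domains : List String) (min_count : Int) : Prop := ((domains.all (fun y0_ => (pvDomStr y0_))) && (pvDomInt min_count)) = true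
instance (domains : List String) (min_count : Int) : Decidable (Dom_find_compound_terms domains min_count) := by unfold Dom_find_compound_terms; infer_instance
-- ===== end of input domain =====

-- B replaces the 70 substring searches per domain by one sliding-window scan that looks windows up
-- in a precomputed pattern set (alternative algorithm, same results including Counter order).

-- ===== PORT A =====
def find_compound_terms (domains : List String) (min_count : Int) : List (String × Int) :=
  let prefixes : List String := ["sex", "porn", "xxx", "hot", "live", "free", "real", "true"]
  let suffixes : List String := ["sex", "porn", "hub", "tube", "cam", "show", "site", "zone", "land"]
  let compound_counter : PySem.Dict String Int :=
    domains.foldl (fun cc domain =>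
      let domain_lower := PySem.Str.lower domain
      prefixes.foldl (fun cc p =>
        suffixes.foldl (fun cc s =>
          let compound := p ++ s
          if PySem.Str.isIn compound domain_lower && p != s then
            cc.modify compound 0 (· + 1)
          else cc) cc) cc)
      PySem.Dict.empty
  (PySem.Dict.ofList (compound_counter.items.filter (fun tc => decide (min_count ≤ tc.2)))).items

-- ===== PORT B =====
def find_compound_terms_alt (domains : List String) (min_count : Int) : List (String × Int) :=
  let prefixes : List String := ["sex", "porn", "xxx", "hot", "live", "free", "real", "true"]
  let suffixes : List String := ["sex", "porn", "hub", "tube", "cam", "show", "site", "zone", "land"]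
  let compounds : List String :=
    prefixes.flatMap (fun p => (suffixes.filter (fun s => p != s)).map (fun s => p ++ s))
  let compound_set : PySem.Set String := PySem.Set.ofList compounds
  let counts : PySem.Dict String Int :=
    domains.foldl (fun counts domain =>
      let d := PySem.Str.lower domain
      let hits : PySem.Set String :=
        (PySem.List.pyRange 0 (PySem.Str.len d) 1).foldl (fun hits i =>
          [PySem.Str.slice d (some i) (some (i + 6)),
           PySem.Str.slice d (some i) (some (i + 7)),
           PySem.Str.slice d (some i) (some (i + 8))].foldl
            (fun hits w => if compound_set.contains w then hits.add w else hits) hits)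
          PySem.Set.empty
      compounds.foldl (fun counts c =>
        if hits.contains c then counts.insert c (counts.getD c 0 + 1) else counts) counts)
      PySem.Dict.empty
  (PySem.Dict.ofList (counts.items.filter (fun tc => decide (min_count ≤ tc.2)))).items

-- ===== PRECONDITION & SPEC =====
def Spec_find_compound_terms (domains : List String) (min_count : Int) (out : List (String × Int)) : Prop := out = find_compound_terms_alt domains min_count
instance (domains : List String) (min_count : Int) (out : List (String × Int)) : Decidable (Spec_find_compound_terms domains min_count out) := by unfold Spec_find_compound_terms; infer_instance

-- ===== CLAIM (what is proved, stated in full; the proofs are below) =====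
def Claim_equal_find_compound_terms : Prop := ∀ (domains : List String) (min_count : Int), Dom_find_compound_terms domains min_count → Spec_find_compound_terms domains min_count (find_compound_terms domains min_count)

-- ===== LEMMAS AND PROOFS =====

-- the 70 compound patterns, in A's iteration order
def pvCompounds : List String :=
  ["sexporn", "sexhub", "sextube", "sexcam", "sexshow", "sexsite", "sexzone", "sexland", "pornsex",
   "pornhub", "porntube", "porncam", "pornshow", "pornsite", "pornzone", "pornland", "xxxsex",
   "xxxporn", "xxxhub", "xxxtube", "xxxcam", "xxxshow", "xxxsite", "xxxzone", "xxxland", "hotsex",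
   "hotporn", "hothub", "hottube", "hotcam", "hotshow", "hotsite", "hotzone", "hotland", "livesex",
   "liveporn", "livehub", "livetube", "livecam", "liveshow", "livesite", "livezone", "liveland",
   "freesex", "freeporn", "freehub", "freetube", "freecam", "freeshow", "freesite", "freezone",
   "freeland", "realsex", "realporn", "realhub", "realtube", "realcam", "realshow", "realsite",
   "realzone", "realland", "truesex", "trueporn", "truehub", "truetube", "truecam", "trueshow",
   "truesite", "truezone", "trueland"]

-- B's comprehension evaluates to that literal list
set_option maxRecDepth 10000 in
lemma pvCompounds_eq :
    (["sex", "porn", "xxx", "hot", "live", "free", "real", "true"] : List String).flatMap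
      (fun p => ((["sex", "porn", "hub", "tube", "cam", "show", "site", "zone", "land"] : List String).filter
        (fun s => p != s)).map (fun s => p ++ s)) = pvCompounds := by decide

-- A's prefix×suffix pair enumeration, filtered and concatenated, is the same list
set_option maxRecDepth 10000 in
lemma pvPairs_eq :
    (((["sex", "porn", "xxx", "hot", "live", "free", "real", "true"] : List String).flatMap
        (fun p => (["sex", "porn", "hub", "tube", "cam", "show", "site", "zone", "land"] : List String).map
          (fun s => (p, s)))).filter (fun ps => ps.1 != ps.2)).map (fun ps => ps.1 ++ ps.2)
      = pvCompounds := by decide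

-- every compound has length 6/7/8 and is in the pattern set
set_option maxRecDepth 10000 in
lemma pvCompounds_facts :
    ∀ c ∈ pvCompounds, (c.toList.length = 6 ∨ c.toList.length = 7 ∨ c.toList.length = 8) ∧
      (PySem.Set.ofList pvCompounds).contains c = true := by decide

-- a nested fold over two lists is a fold over the pair enumeration
lemma pv_foldl_nested {kappa : Type} (f : kappa → (String × String) → kappa) (P S : List String) :
    ∀ cc, P.foldl (fun cc p => S.foldl (fun cc s => f cc (p, s)) cc) cc
      = (P.flatMap (fun p => S.map (fun s => (p, s)))).foldl f cc := by
  induction P with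
  | nil => intro cc; rfl
  | cons p t ih =>
    intro cc
    simp only [List.foldl_cons, List.flatMap_cons, List.foldl_append, ih, List.foldl_map]

-- a guarded fold over pairs is a fold over the filtered concatenations
lemma pv_pairs_fold {kappa : Type} (q : String → Bool) (g : kappa → String → kappa)
    (l : List (String × String)) :
    ∀ cc, l.foldl (fun cc ps =>
        if q (ps.1 ++ ps.2) && ps.1 != ps.2 then g cc (ps.1 ++ ps.2) else cc) cc
      = ((l.filter (fun ps => ps.1 != ps.2)).map (fun ps => ps.1 ++ ps.2)).foldl
          (fun cc c => if q c then g cc c else cc) cc := by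
  induction l with
  | nil => intro cc; rfl
  | cons a t ih =>
    intro cc
    by_cases ha : (a.1 != a.2) = true
    · simp only [List.foldl_cons, List.filter_cons, ha, if_true, List.map_cons, Bool.and_true, ih]
    · have ha' : (a.1 != a.2) = false := by revert ha; cases a.1 != a.2 <;> simp
      simp only [List.foldl_cons, List.filter_cons, ha', Bool.false_eq_true, if_false,
        Bool.and_false, ih]

-- membership in a conditional-add fold over a Set
lemma pv_mem_foldl_set {iota : Type} (F : PySem.Set String → iota → PySem.Set String)
    (P : iota → String → Prop) (hF : ∀ h a x, x ∈ F h a ↔ x ∈ h ∨ P a x) :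
    ∀ (l : List iota) (s : PySem.Set String) (x : String),
      x ∈ l.foldl F s ↔ x ∈ s ∨ ∃ a ∈ l, P a x := by
  intro l
  induction l with
  | nil => simp
  | cons a t ih =>
    intro s x
    simp only [List.foldl_cons, ih, hF, List.mem_cons]
    constructor
    · rintro ((h | h) | ⟨b, hb, hp⟩)
      · exact Or.inl h
      · exact Or.inr ⟨a, Or.inl rfl, h⟩
      · exact Or.inr ⟨b, Or.inr hb, hp⟩
    · rintro (h | ⟨b, (rfl | hb), hp⟩)
      · exact Or.inl (Or.inl h)
      · exact Or.inl (Or.inr hp)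
      · exact Or.inr ⟨b, hb, hp⟩

-- the sliding-window hit set contains c iff c occurs as a substring (patterns of length 6/7/8)
lemma pv_contains_hits (d c : String) (cset : PySem.Set String)
    (hlen : c.toList.length = 6 ∨ c.toList.length = 7 ∨ c.toList.length = 8)
    (hc : cset.contains c = true) :
    ((PySem.List.pyRange 0 (PySem.Str.len d) 1).foldl (fun hits i =>
        [PySem.Str.slice d (some i) (some (i + 6)),
         PySem.Str.slice d (some i) (some (i + 7)),
         PySem.Str.slice d (some i) (some (i + 8))].foldl
          (fun hits w => if cset.contains w then hits.add w else hits) hits)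
        PySem.Set.empty).contains c = PySem.Str.isIn c d := by
  rw [Bool.eq_iff_iff]
  have hinner : ∀ (l : List String) (h : PySem.Set String) (x : String),
      x ∈ l.foldl (fun hits w => if cset.contains w then hits.add w else hits) h ↔
        x ∈ h ∨ ∃ w ∈ l, cset.contains w = true ∧ x = w := by
    intro l h x
    refine pv_mem_foldl_set _ (fun w x => cset.contains w = true ∧ x = w) ?_ l h x
    intro h w x
    by_cases hw : w ∈ cset <;> simp [hw, PySem.Set.mem_add]
  have hmem := pv_mem_foldl_set
      (fun hits i =>
        [PySem.Str.slice d (some i) (some (i + 6)),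
         PySem.Str.slice d (some i) (some (i + 7)),
         PySem.Str.slice d (some i) (some (i + 8))].foldl
          (fun hits w => if cset.contains w then hits.add w else hits) hits)
      (fun i x => ∃ w ∈ [PySem.Str.slice d (some i) (some (i + 6)),
         PySem.Str.slice d (some i) (some (i + 7)),
         PySem.Str.slice d (some i) (some (i + 8))], cset.contains w = true ∧ x = w)
      (fun h i x => hinner _ h x)
      (PySem.List.pyRange 0 (PySem.Str.len d) 1) PySem.Set.empty c
  rw [PySem.Set.contains_iff, hmem]
  constructor
  · rintro (h | ⟨i, hi, w, hw, hcw, hew⟩)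
    · simp [PySem.Set.empty] at h
    · rw [PySem.List.mem_pyRange_one] at hi
      obtain ⟨hi0, _⟩ := hi
      have hwin : ∀ L : Int, 0 ≤ L →
          (PySem.Str.slice d (some i) (some (i + L))).toList <+: d.toList.drop i.toNat := by
        intro L hL
        have hsl : (PySem.Str.slice d (some i) (some (i + L))).toList =
            (d.toList.drop i.toNat).take ((i + L).toNat - i.toNat) := by
          simp [PySem.Str.slice]
          exact PySem.List.slice_toNat d.toList hi0 (by omega)
        rw [hsl]
        exact List.take_prefix _ _
      have hpre : ∃ j, c.toList <+: d.toList.drop j := by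
        simp only [List.mem_cons, List.not_mem_nil, or_false] at hw
        rcases hw with hw | hw | hw <;> rw [hew, hw]
        · exact ⟨i.toNat, hwin 6 (by norm_num)⟩
        · exact ⟨i.toNat, hwin 7 (by norm_num)⟩
        · exact ⟨i.toNat, hwin 8 (by norm_num)⟩
      have := (PySem.Chars.exists_prefix_drop_iff_isIn c.toList d.toList).mp hpre
      simpa using this
  · intro hin
    have hisin : PySem.Chars.isIn c.toList d.toList = true := by simpa using hin
    obtain ⟨j, hj⟩ := (PySem.Chars.exists_prefix_drop_iff_isIn c.toList d.toList).mpr hisin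
    have hclen : 6 ≤ c.toList.length := by rcases hlen with h | h | h <;> omega
    have hjle : c.toList.length ≤ d.toList.length - j := by
      have := hj.length_le
      simpa using this
    have hjlt : j < d.toList.length := by omega
    have hts : ∀ L : Int, 0 ≤ L →
        (PySem.Str.slice d (some (j : Int)) (some ((j : Int) + L))).toList =
          (d.toList.drop j).take L.toNat := by
      intro L hL
      have hsl : PySem.List.slice d.toList (some (j : Int)) (some ((j : Int) + L)) =
          (d.toList.drop ((j : Int)).toNat).take (((j : Int) + L).toNat - ((j : Int)).toNat) := by
        exact PySem.List.slice_toNat d.toList (by positivity) (by omega)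
      simp [PySem.Str.slice, hsl]
      congr 1
      omega
    have htake : c.toList = (d.toList.drop j).take c.toList.length :=
      List.prefix_iff_eq_take.mp hj
    refine Or.inr ⟨(j : Int), ?_, c, ?_, hc, rfl⟩
    · rw [PySem.List.mem_pyRange_one]
      refine ⟨Int.natCast_nonneg j, ?_⟩
      have hlen' : PySem.Str.len d = (d.toList.length : Int) := by simp
      rw [hlen']
      exact_mod_cast hjlt
    · simp only [List.mem_cons, List.not_mem_nil, or_false]
      rcases hlen with h | h | h
      · refine Or.inl (String.toList_inj.mp ?_)
        rw [hts 6 (by norm_num), htake, h]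
        rfl
      · refine Or.inr (Or.inl (String.toList_inj.mp ?_))
        rw [hts 7 (by norm_num), htake, h]
        rfl
      · refine Or.inr (Or.inr (String.toList_inj.mp ?_))
        rw [hts 8 (by norm_num), htake, h]
        rfl

-- one domain step: A's nested prefix×suffix loop equals B's window-scan step
set_option maxHeartbeats 1000000 in
set_option maxRecDepth 10000 in
lemma pv_step_eq (cc : PySem.Dict String Int) (domain : String) :
    (["sex", "porn", "xxx", "hot", "live", "free", "real", "true"] : List String).foldl (fun cc p =>
      (["sex", "porn", "hub", "tube", "cam", "show", "site", "zone", "land"] : List String).foldl (fun cc s =>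
        if PySem.Str.isIn (p ++ s) (PySem.Str.lower domain) && p != s then
          cc.modify (p ++ s) 0 (· + 1)
        else cc) cc) cc
    = pvCompounds.foldl (fun cc c =>
        if ((PySem.List.pyRange 0 (PySem.Str.len (PySem.Str.lower domain)) 1).foldl (fun hits i =>
            [PySem.Str.slice (PySem.Str.lower domain) (some i) (some (i + 6)),
             PySem.Str.slice (PySem.Str.lower domain) (some i) (some (i + 7)),
             PySem.Str.slice (PySem.Str.lower domain) (some i) (some (i + 8))].foldl
              (fun hits w => if (PySem.Set.ofList pvCompounds).contains w then hits.add w else hits) hits)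
            PySem.Set.empty).contains c then
          cc.insert c (cc.getD c 0 + 1)
        else cc) cc := by
  rw [pv_foldl_nested (fun (cc : PySem.Dict String Int) ps =>
        if PySem.Str.isIn (ps.1 ++ ps.2) (PySem.Str.lower domain) && ps.1 != ps.2 then
          cc.modify (ps.1 ++ ps.2) 0 (· + 1) else cc)]
  rw [pv_pairs_fold (fun c => PySem.Str.isIn c (PySem.Str.lower domain))
        (fun (cc : PySem.Dict String Int) c => cc.modify c 0 (· + 1))]
  rw [pvPairs_eq]
  refine PySem.List.foldl_congr_mem pvCompounds _ _ cc ?_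
  intro acc c hcmem
  obtain ⟨hlen, hcset⟩ := pvCompounds_facts c hcmem
  rw [pv_contains_hits (PySem.Str.lower domain) c (PySem.Set.ofList pvCompounds) hlen hcset]
  rfl

-- ===== VERDICT (by name: the statement is the Claim_ definition above) =====
set_option maxHeartbeats 1000000 in
set_option maxRecDepth 10000 in
theorem find_compound_terms_spec : Claim_equal_find_compound_terms := by
  intro domains min_count _
  unfold Spec_find_compound_terms
  have hcnt : domains.foldl (fun cc domain =>
      (["sex", "porn", "xxx", "hot", "live", "free", "real", "true"] : List String).foldl (fun cc p =>
        (["sex", "porn", "hub", "tube", "cam", "show", "site", "zone", "land"] : List String).foldl (fun cc s =>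
          if PySem.Str.isIn (p ++ s) (PySem.Str.lower domain) && p != s then
            cc.modify (p ++ s) 0 (· + 1)
          else cc) cc) cc) (PySem.Dict.empty : PySem.Dict String Int)
    = domains.foldl (fun cc domain =>
        pvCompounds.foldl (fun cc c =>
          if ((PySem.List.pyRange 0 (PySem.Str.len (PySem.Str.lower domain)) 1).foldl (fun hits i =>
              [PySem.Str.slice (PySem.Str.lower domain) (some i) (some (i + 6)),
               PySem.Str.slice (PySem.Str.lower domain) (some i) (some (i + 7)),
               PySem.Str.slice (PySem.Str.lower domain) (some i) (some (i + 8))].foldl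
                (fun hits w => if (PySem.Set.ofList pvCompounds).contains w then hits.add w else hits) hits)
              PySem.Set.empty).contains c then
            cc.insert c (cc.getD c 0 + 1)
          else cc) cc) PySem.Dict.empty :=
    PySem.List.foldl_congr_mem domains _ _ PySem.Dict.empty (fun cc domain _ => pv_step_eq cc domain)
  show (PySem.Dict.ofList ((domains.foldl (fun cc domain =>
      (["sex", "porn", "xxx", "hot", "live", "free", "real", "true"] : List String).foldl (fun cc p =>
        (["sex", "porn", "hub", "tube", "cam", "show", "site", "zone", "land"] : List String).foldl (fun cc s =>
          if PySem.Str.isIn (p ++ s) (PySem.Str.lower domain) && p != s then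
            cc.modify (p ++ s) 0 (· + 1)
          else cc) cc) cc) (PySem.Dict.empty : PySem.Dict String Int)).items.filter
        (fun tc => decide (min_count ≤ tc.2)))).items
    = (PySem.Dict.ofList ((domains.foldl (fun cc domain =>
        ((["sex", "porn", "xxx", "hot", "live", "free", "real", "true"] : List String).flatMap
          (fun p => ((["sex", "porn", "hub", "tube", "cam", "show", "site", "zone", "land"] : List String).filter
            (fun s => p != s)).map (fun s => p ++ s))).foldl (fun cc c =>
          if ((PySem.List.pyRange 0 (PySem.Str.len (PySem.Str.lower domain)) 1).foldl (fun hits i =>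
              [PySem.Str.slice (PySem.Str.lower domain) (some i) (some (i + 6)),
               PySem.Str.slice (PySem.Str.lower domain) (some i) (some (i + 7)),
               PySem.Str.slice (PySem.Str.lower domain) (some i) (some (i + 8))].foldl
                (fun hits w => if (PySem.Set.ofList
                    ((["sex", "porn", "xxx", "hot", "live", "free", "real", "true"] : List String).flatMap
                      (fun p => ((["sex", "porn", "hub", "tube", "cam", "show", "site", "zone", "land"] : List String).filter
                        (fun s => p != s)).map (fun s => p ++ s)))).contains w then hits.add w else hits) hits)
              PySem.Set.empty).contains c then
            cc.insert c (cc.getD c 0 + 1)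
          else cc) cc) (PySem.Dict.empty : PySem.Dict String Int)).items.filter
        (fun tc => decide (min_count ≤ tc.2)))).items
  rw [pvCompounds_eq]
  exact congrArg (fun X : PySem.Dict String Int =>
    (PySem.Dict.ofList (X.items.filter (fun tc => decide (min_count ≤ tc.2)))).items) hcnt
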